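-- pv_equiv track=rewrite | github.com/jasondaemon/hugo-family-tree | admin/api/migrations/wp_sql_import.py | split_rows
-- ===== SOURCE A (Python) =====
-- def split_rows(values_blob: str) -> list[str]:
--     rows: list[str] = []
--     buf: list[str] = []
--     depth = 0
--     in_str = False
--     esc = False
--     for ch in values_blob:
--         buf.append(ch)
--         if in_str:
--             if esc:
--                 esc = False
--             elif ch == "\\":
--                 esc = True
--             elif ch == "'":
--                 in_str = False
--         else:
--             if ch == "'":
--                 in_str = True
--             elif ch == "(":
--                 depth += 1
--             elif ch == ")":
--                 depth -= 1
--                 if depth == 0: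
--                     row = "".join(buf).strip().rstrip(",").lstrip(",").strip()
--                     if row:
--                         rows.append(row)
--                     buf = []
--     return rows
-- ===== SOURCE B (Python) =====
-- def _top_close(s: str):
--     """Index of the first ')' that brings the paren depth (outside quotes) to exactly 0, or None.
--
--     Quoted sections are skipped with a dedicated inner loop instead of
--     carrying in_str/esc flags through one big state machine.
--     """
--     depth = 0
--     i = 0
--     n = len(s)
--     while i < n:
--         ch = s[i]
--         if ch == "'":
--             i += 1
--             while i < n:
--                 if s[i] == "\\":
--                     i += 2
--                 elif s[i] == "'":
--                     i += 1
--                     break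
--                 else:
--                     i += 1
--             continue
--         if ch == "(":
--             depth += 1
--         elif ch == ")":
--             depth -= 1
--             if depth == 0:
--                 return i
--         i += 1
--     return None
--
--
-- def split_rows(values_blob: str) -> list[str]:
--     rows: list[str] = []
--     rest = values_blob
--     while True:
--         cut = _top_close(rest)
--         if cut is None:
--             return rows
--         row = rest[:cut + 1].strip().rstrip(",").lstrip(",").strip()
--         if row:
--             rows.append(row)
--         rest = rest[cut + 1:]
-- ===== Notes on version B (the rewrite author's own statement) =====
-- stated objective: alternative
-- what changed: A threads one buffered state machine (buf/depth/in_str/esc flags) over the whole blob; B instead finds the index of the first top-level closing paren with a scanner whose quoted sections are skipped by a dedicated inner loop (no in_str/esc flags), slices that row off, and restarts fresh on the remainder.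
import Mathlib
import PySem

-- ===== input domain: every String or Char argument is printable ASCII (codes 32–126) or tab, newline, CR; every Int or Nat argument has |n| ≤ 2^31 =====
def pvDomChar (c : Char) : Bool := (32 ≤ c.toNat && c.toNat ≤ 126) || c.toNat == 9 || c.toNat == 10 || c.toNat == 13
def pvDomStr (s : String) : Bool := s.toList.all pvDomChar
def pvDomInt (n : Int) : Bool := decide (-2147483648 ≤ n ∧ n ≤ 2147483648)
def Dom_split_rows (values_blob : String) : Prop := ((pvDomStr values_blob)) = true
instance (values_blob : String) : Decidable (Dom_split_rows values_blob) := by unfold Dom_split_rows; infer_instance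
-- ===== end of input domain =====

-- B replaces A's one-pass flag state machine (in_str/esc carried through a single buffered loop)
-- by a cut-and-recurse decomposition: find the first top-level closing paren, slice the row off, restart
-- fresh on the remainder, with quoted sections skipped by a dedicated inner loop. Objective:
-- alternative structure, same cost.

-- ===== PORT A =====
-- ''.join(buf).strip().rstrip(",").lstrip(",").strip()  — the identical cleanup chain appears
-- verbatim in both Pythons, so both ports share it. rstrip(",")/lstrip(",") with a ONE-character
-- strip set are exactly dropWhile (· = ',') from the respective end.
def rstripComma (cs : List Char) : List Char := (cs.reverse.dropWhile (· == ',')).reverse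
def lstripComma (cs : List Char) : List Char := cs.dropWhile (· == ',')
def cleanRow (cs : List Char) : List Char :=
  PySem.Chars.strip (lstripComma (rstripComma (PySem.Chars.strip cs)))

def loopA : List Char → List String → List Char → Int → Bool → Bool → List String
  | [], rows, _, _, _, _ => rows
  | ch :: rest, rows, buf, depth, instr, esc =>
    let buf' := buf ++ [ch]
    if instr then
      if esc then loopA rest rows buf' depth instr false
      else if ch = '\\' then loopA rest rows buf' depth instr true
      else if ch = '\'' then loopA rest rows buf' depth false esc
      else loopA rest rows buf' depth instr esc
    else
      if ch = '\'' then loopA rest rows buf' depth true esc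
      else if ch = '(' then loopA rest rows buf' (depth + 1) instr esc
      else if ch = ')' then
        if depth - 1 = 0 then
          let row := cleanRow buf'
          loopA rest (if row ≠ [] then rows ++ [String.ofList row] else rows) [] (depth - 1) instr esc
        else loopA rest rows buf' (depth - 1) instr esc
      else loopA rest rows buf' depth instr esc

def split_rows (values_blob : String) : List String :=
  loopA values_blob.toList [] [] 0 false false

-- ===== PORT B =====
-- inner while loop of _top_close: skip a quoted section; returns (index after it, chars after it)
def skipStr : List Char → Nat → Nat × List Char
  | [], i => (i, [])
  | c :: cs, i =>
    if c = '\\' then skipStr cs.tail (i + 2)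
    else if c = '\'' then (i + 1, cs)
    else skipStr cs (i + 1)
termination_by cs _ => cs.length
decreasing_by
  · cases cs <;> simp
  · simp

lemma skipStr_len : ∀ (n : Nat) (cs : List Char), cs.length ≤ n → ∀ (i : Nat),
    (skipStr cs i).2.length ≤ cs.length := by
  intro n
  induction n with
  | zero =>
    intro cs h i
    have : cs = [] := List.eq_nil_of_length_eq_zero (Nat.le_zero.mp h)
    subst this; simp [skipStr]
  | succ n ih =>
    intro cs h i
    match cs with
    | [] => simp [skipStr]
    | c :: cs' =>
      by_cases hb : c = '\\'
      · have := ih cs'.tail (by cases cs' <;> simp at h ⊢ <;> omega) (i + 2)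
        simp only [skipStr, if_pos hb, List.length_cons]
        have htl : cs'.tail.length ≤ cs'.length := by cases cs' <;> simp
        omega
      · by_cases hq : c = '\''
        · simp [skipStr, hb, hq]
        · have := ih cs' (by simp at h ⊢; omega) (i + 1)
          simp only [skipStr, if_neg hb, if_neg hq, List.length_cons]
          omega

def topCloseGo : List Char → Nat → Int → Option Nat
  | [], _, _ => none
  | c :: cs, i, depth =>
    if c = '\'' then
      topCloseGo (skipStr cs (i + 1)).2 (skipStr cs (i + 1)).1 depth
    else if c = '(' then topCloseGo cs (i + 1) (depth + 1)
    else if c = ')' then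
      if depth - 1 = 0 then some i else topCloseGo cs (i + 1) (depth - 1)
    else topCloseGo cs (i + 1) depth
termination_by cs _ _ => cs.length
decreasing_by
  · exact Nat.lt_succ_of_le (skipStr_len _ _ le_rfl _)
  · simp
  · simp
  · simp

def splitAltGo (s : List Char) (rows : List String) : List String :=
  match h : topCloseGo s 0 0 with
  | none => rows
  | some cut =>
    let row := cleanRow (s.take (cut + 1))
    splitAltGo (s.drop (cut + 1)) (if row ≠ [] then rows ++ [String.ofList row] else rows)
termination_by s.length
decreasing_by
  cases s with
  | nil => simp [topCloseGo] at h
  | cons c cs => simp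

def split_rows_alt (values_blob : String) : List String :=
  splitAltGo values_blob.toList []

-- ===== PRECONDITION & SPEC =====
def Spec_split_rows (values_blob : String) (out : List String) : Prop := out = split_rows_alt values_blob
instance (values_blob : String) (out : List String) : Decidable (Spec_split_rows values_blob out) := by unfold Spec_split_rows; infer_instance

-- ===== CLAIM (what is proved, stated in full; the proofs are below) =====
def Claim_equal_split_rows : Prop := ∀ (values_blob : String), Dom_split_rows values_blob → Spec_split_rows values_blob (split_rows values_blob)

-- ===== LEMMAS AND PROOFS =====

-- emit step shared by both loops (proof-only helper)
def pvEmit (rows : List String) (b : List Char) : List String :=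
  if cleanRow b ≠ [] then rows ++ [String.ofList (cleanRow b)] else rows

lemma skipStr_spec : ∀ (n : Nat) (cs : List Char), cs.length ≤ n → ∀ (i : Nat),
    skipStr cs i = (i + (skipStr cs 0).1, cs.drop (skipStr cs 0).1) := by
  intro n
  induction n with
  | zero =>
    intro cs h i
    have : cs = [] := List.eq_nil_of_length_eq_zero (Nat.le_zero.mp h)
    subst this; simp [skipStr]
  | succ n ih =>
    intro cs h i
    match cs with
    | [] => simp [skipStr]
    | c :: cs' =>
      by_cases hb : c = '\\'
      · have h1 := ih cs'.tail (by cases cs' <;> simp at h ⊢ <;> omega) (i + 2)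
        have h2 := ih cs'.tail (by cases cs' <;> simp at h ⊢ <;> omega) 2
        simp only [skipStr, if_pos hb]
        rw [h1, h2]
        cases cs' with
        | nil => simp [skipStr]
        | cons c2 cs'' =>
          simp only [Prod.mk.injEq, List.tail_cons]
          constructor
          · omega
          · have h3 : 2 + (skipStr cs'' 0).1 = (skipStr cs'' 0).1 + 1 + 1 := by omega
            rw [h3]
            simp [List.drop_succ_cons]
      · by_cases hq : c = '\''
        · simp [skipStr, hb, hq]
        · have h1 := ih cs' (by simp at h; omega) (i + 1)
          have h2 := ih cs' (by simp at h; omega) 1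
          simp only [skipStr, if_neg hb, if_neg hq]
          rw [h1, h2]
          simp only [Prod.mk.injEq]
          constructor
          · omega
          · have h3 : 1 + (skipStr cs' 0).1 = (skipStr cs' 0).1 + 1 := by omega
            rw [h3]
            simp [List.drop_succ_cons]

lemma topCloseGo_shift : ∀ (n : Nat) (cs : List Char), cs.length ≤ n → ∀ (i : Nat) (d : Int),
    topCloseGo cs i d = (topCloseGo cs 0 d).map (fun j => i + j) := by
  intro n
  induction n with
  | zero =>
    intro cs h i d
    have : cs = [] := List.eq_nil_of_length_eq_zero (Nat.le_zero.mp h)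
    subst this; simp [topCloseGo]
  | succ n ih =>
    intro cs h i d
    match cs with
    | [] => simp [topCloseGo]
    | c :: cs' =>
      by_cases hq : c = '\''
      · have hs1 := skipStr_spec cs'.length cs' le_rfl (i + 1)
        have hs2 := skipStr_spec cs'.length cs' le_rfl 1
        have hlen : (cs'.drop (skipStr cs' 0).1).length ≤ n := by
          simp_all; omega
        simp only [topCloseGo, if_pos hq]
        rw [hs1, hs2]
        rw [ih _ hlen (i + 1 + (skipStr cs' 0).1) d, ih _ hlen (1 + (skipStr cs' 0).1) d]
        cases topCloseGo (cs'.drop (skipStr cs' 0).1) 0 d <;> simp <;> omega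
      · by_cases hp : c = '('
        · simp only [topCloseGo, if_neg hq, if_pos hp]
          rw [ih cs' (by simp at h; omega) (i + 1) (d + 1), ih cs' (by simp at h; omega) 1 (d + 1)]
          cases topCloseGo cs' 0 (d + 1) <;> simp <;> omega
        · by_cases hc : c = ')'
          · simp only [topCloseGo, if_neg hq, if_neg hp, if_pos hc]
            by_cases hd : d - 1 = 0
            · simp [hd]
            · simp only [if_neg hd]
              rw [ih cs' (by simp at h; omega) (i + 1) (d - 1), ih cs' (by simp at h; omega) 1 (d - 1)]
              cases topCloseGo cs' 0 (d - 1) <;> simp <;> omega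
          · simp only [topCloseGo, if_neg hq, if_neg hp, if_neg hc]
            rw [ih cs' (by simp at h; omega) (i + 1) d, ih cs' (by simp at h; omega) 1 d]
            cases topCloseGo cs' 0 d <;> simp <;> omega

lemma loopA_str : ∀ (n : Nat) (cs : List Char), cs.length ≤ n →
    ∀ (rows : List String) (buf : List Char) (d : Int),
    loopA cs rows buf d true false
      = loopA (cs.drop (skipStr cs 0).1) rows (buf ++ cs.take (skipStr cs 0).1) d false false := by
  intro n
  induction n with
  | zero =>
    intro cs h rows buf d
    have : cs = [] := List.eq_nil_of_length_eq_zero (Nat.le_zero.mp h)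
    subst this; simp [loopA, skipStr]
  | succ n ih =>
    intro cs h rows buf d
    match cs with
    | [] => simp [loopA, skipStr]
    | c :: cs' =>
      by_cases hb : c = '\\'
      · -- esc := True, then the next character (if any) is consumed unconditionally
        cases cs' with
        | nil => simp [loopA, skipStr, hb]
        | cons c2 cs'' =>
          have h1 := ih cs'' (by simp at h; omega) rows (buf ++ [c] ++ [c2]) d
          have hk : (skipStr (c :: c2 :: cs'') 0).1 = 2 + (skipStr cs'' 0).1 := by
            simp only [skipStr, if_pos hb, List.tail_cons]
            rw [skipStr_spec cs''.length cs'' le_rfl 2]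
          have hdrop : (c :: c2 :: cs'').drop (2 + (skipStr cs'' 0).1) = cs''.drop (skipStr cs'' 0).1 := by
            have h3 : 2 + (skipStr cs'' 0).1 = (skipStr cs'' 0).1 + 1 + 1 := by omega
            rw [h3]; simp [List.drop_succ_cons]
          have htake : (c :: c2 :: cs'').take (2 + (skipStr cs'' 0).1) = c :: c2 :: cs''.take (skipStr cs'' 0).1 := by
            have h3 : 2 + (skipStr cs'' 0).1 = (skipStr cs'' 0).1 + 1 + 1 := by omega
            rw [h3]; simp [List.take_succ_cons]
          rw [hk, hdrop, htake]
          simp only [loopA, if_pos hb, if_neg (by simp : ¬(true = false))] at *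
          rw [h1]
          simp
      · by_cases hq : c = '\''
        · simp only [loopA, if_neg hb, if_pos hq]
          have hk : (skipStr (c :: cs') 0).1 = 1 := by simp [skipStr, hb, hq]
          rw [hk]
          simp [loopA]
        · have h1 := ih cs' (by simp at h; omega) rows (buf ++ [c]) d
          have hk : (skipStr (c :: cs') 0).1 = 1 + (skipStr cs' 0).1 := by
            simp only [skipStr, if_neg hb, if_neg hq]
            rw [skipStr_spec cs'.length cs' le_rfl 1]
          have h3 : 1 + (skipStr cs' 0).1 = (skipStr cs' 0).1 + 1 := by omega
          rw [hk, h3]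
          simp only [List.drop_succ_cons, List.take_succ_cons]
          simp only [loopA, if_neg hb, if_neg hq]
          rw [h1]
          simp

-- main bridge: A's loop from a non-string state equals B's cut-and-recurse
lemma loopA_eq_splitAlt : ∀ (n : Nat) (cs : List Char), cs.length ≤ n →
    ∀ (d : Int) (rows : List String) (buf : List Char),
    loopA cs rows buf d false false
      = match topCloseGo cs 0 d with
        | none => rows
        | some j => splitAltGo (cs.drop (j + 1)) (pvEmit rows (buf ++ cs.take (j + 1))) := by
  intro n
  induction n with
  | zero =>
    intro cs h d rows buf
    have : cs = [] := List.eq_nil_of_length_eq_zero (Nat.le_zero.mp h)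
    subst this; simp [loopA, topCloseGo]
  | succ n ih =>
    intro cs h d rows buf
    match cs with
    | [] => simp [loopA, topCloseGo]
    | c :: cs' =>
      by_cases hq : c = '\''
      · -- A enters string mode; B skips the quoted section
        have hs1 := skipStr_spec cs'.length cs' le_rfl 1
        have hlen : (cs'.drop (skipStr cs' 0).1).length ≤ n := by simp_all; omega
        have hstr := loopA_str cs'.length cs' le_rfl rows (buf ++ [c]) d
        have h1 := ih _ hlen d rows (buf ++ [c] ++ cs'.take (skipStr cs' 0).1)
        simp only [loopA, if_neg (by simp : ¬(false = true)), if_pos hq] at *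
        rw [hstr, h1]
        simp only [topCloseGo, if_pos hq]
        rw [hs1]
        rw [topCloseGo_shift (cs'.drop (skipStr cs' 0).1).length _ le_rfl (1 + (skipStr cs' 0).1) d]
        cases htc : topCloseGo (cs'.drop (skipStr cs' 0).1) 0 d with
        | none => simp
        | some j =>
          simp only [Option.map_some]
          have hdrop : (c :: cs').drop (1 + (skipStr cs' 0).1 + j + 1)
              = (cs'.drop (skipStr cs' 0).1).drop (j + 1) := by
            have h3 : 1 + (skipStr cs' 0).1 + j + 1 = ((skipStr cs' 0).1 + (j + 1)) + 1 := by omega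
            rw [h3]
            simp [List.drop_succ_cons, List.drop_drop]
          have htake : buf ++ [c] ++ cs'.take (skipStr cs' 0).1 ++ (cs'.drop (skipStr cs' 0).1).take (j + 1)
              = buf ++ (c :: cs').take (1 + (skipStr cs' 0).1 + j + 1) := by
            have h3 : 1 + (skipStr cs' 0).1 + j + 1 = ((skipStr cs' 0).1 + (j + 1)) + 1 := by omega
            rw [h3]
            simp [List.take_succ_cons, List.take_add]
          rw [hdrop, htake]
      · by_cases hp : c = '('
        · have h1 := ih cs' (by simp at h; omega) (d + 1) rows (buf ++ [c])
          simp only [loopA, if_neg (by simp : ¬(false = true)), if_neg hq, if_pos hp]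
          rw [h1]
          simp only [topCloseGo, if_neg hq, if_pos hp]
          rw [topCloseGo_shift cs'.length cs' le_rfl 1 (d + 1)]
          cases htc : topCloseGo cs' 0 (d + 1) with
          | none => simp
          | some j =>
            simp only [Option.map_some]
            have h3 : 1 + j + 1 = (j + 1) + 1 := by omega
            rw [h3]
            simp [List.drop_succ_cons, List.take_succ_cons]
        · by_cases hc : c = ')'
          · by_cases hd : d - 1 = 0
            · -- the emitting close paren: both sides cut here and restart fresh
              have h1 := ih cs' (by simp at h; omega) 0 (pvEmit rows (buf ++ [c])) []
              simp only [loopA, if_neg (by simp : ¬(false = true)), if_neg hq, if_neg hp, if_pos hc,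
                if_pos hd]
              simp only [topCloseGo, if_neg hq, if_neg hp, if_pos hc, if_pos hd]
              rw [hd]
              have hfold : (if cleanRow (buf ++ [c]) ≠ [] then
                  rows ++ [String.ofList (cleanRow (buf ++ [c]))] else rows) = pvEmit rows (buf ++ [c]) := rfl
              rw [hfold, h1]
              rw [splitAltGo]
              simp only [Nat.zero_add, List.drop_succ_cons, List.drop_zero, List.take_succ_cons,
                List.take_zero, List.nil_append, List.append_nil]
              cases htc : topCloseGo cs' 0 0 <;> simp only [pvEmit]
            · have h1 := ih cs' (by simp at h; omega) (d - 1) rows (buf ++ [c])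
              simp only [loopA, if_neg (by simp : ¬(false = true)), if_neg hq, if_neg hp, if_pos hc,
                if_neg hd]
              rw [h1]
              simp only [topCloseGo, if_neg hq, if_neg hp, if_pos hc, if_neg hd]
              rw [topCloseGo_shift cs'.length cs' le_rfl 1 (d - 1)]
              cases htc : topCloseGo cs' 0 (d - 1) with
              | none => simp
              | some j =>
                simp only [Option.map_some]
                have h3 : 1 + j + 1 = (j + 1) + 1 := by omega
                rw [h3]
                simp [List.drop_succ_cons, List.take_succ_cons]
          · have h1 := ih cs' (by simp at h; omega) d rows (buf ++ [c])
            simp only [loopA, if_neg (by simp : ¬(false = true)), if_neg hq, if_neg hp, if_neg hc]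
            rw [h1]
            simp only [topCloseGo, if_neg hq, if_neg hp, if_neg hc]
            rw [topCloseGo_shift cs'.length cs' le_rfl 1 d]
            cases htc : topCloseGo cs' 0 d with
            | none => simp
            | some j =>
              simp only [Option.map_some]
              have h3 : 1 + j + 1 = (j + 1) + 1 := by omega
              rw [h3]
              simp [List.drop_succ_cons, List.take_succ_cons]

-- ===== VERDICT (by name: the statement is the Claim_ definition above) =====
theorem split_rows_spec : Claim_equal_split_rows := by
  intro s _
  unfold Spec_split_rows split_rows split_rows_alt
  rw [loopA_eq_splitAlt s.toList.length s.toList le_rfl 0 [] []]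
  rw [splitAltGo]
  cases h : topCloseGo s.toList 0 0 with
  | none => simp [h]
  | some cut => simp [h, pvEmit]
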